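-- pv_equiv track=rewrite | github.com/CareFrameAI/careframe-research | data/assumptions/assumptions.py | _apply_light_theme_to_svg
-- ===== SOURCE A (Python) =====
-- def _apply_light_theme_to_svg(svg_content):
--     """Apply light theme colors to SVG content."""
--     replacements = {
--         '#2D2D2D': 'white',
--         'rgb(45,45,45)': 'white',
--         '#FFFFFF': 'black',
--         '#ffffff': 'black'
--     }
--     for old_color, new_color in replacements.items():
--         svg_content = svg_content.replace(f'fill="{old_color}"', f'fill="{new_color}"')
--         svg_content = svg_content.replace(f'stroke="{old_color}"', f'stroke="{new_color}"')
--     return svg_content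
-- ===== SOURCE B (Python) =====
-- def _apply_light_theme_to_svg(svg_content):
--     """Apply light theme colors to SVG content (single left-to-right scan)."""
--     color_map = {
--         '#2D2D2D': 'white',
--         'rgb(45,45,45)': 'white',
--         '#FFFFFF': 'black',
--         '#ffffff': 'black'
--     }
--     table = []
--     for old_color, new_color in color_map.items():
--         for attr in ('fill', 'stroke'):
--             table.append((f'{attr}="{old_color}"', f'{attr}="{new_color}"'))
--     out = []
--     i = 0
--     n = len(svg_content)
--     while i < n:
--         c = svg_content[i]
--         if c == 'f' or c == 's':
--             for tok, rep in table:
--                 if svg_content.startswith(tok, i):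
--                     out.append(rep)
--                     i += len(tok)
--                     break
--             else:
--                 out.append(c)
--                 i += 1
--         else:
--             out.append(c)
--             i += 1
--     return ''.join(out)
-- ===== Notes on version B (the rewrite author's own statement) =====
-- stated objective: alternative
-- what changed: Replaces A's eight sequential full-string str.replace passes by a single left-to-right scan that, at each position, matches one of the eight attribute tokens against a precomputed (token, replacement) table and emits the replacement or the current character.
import Mathlib
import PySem

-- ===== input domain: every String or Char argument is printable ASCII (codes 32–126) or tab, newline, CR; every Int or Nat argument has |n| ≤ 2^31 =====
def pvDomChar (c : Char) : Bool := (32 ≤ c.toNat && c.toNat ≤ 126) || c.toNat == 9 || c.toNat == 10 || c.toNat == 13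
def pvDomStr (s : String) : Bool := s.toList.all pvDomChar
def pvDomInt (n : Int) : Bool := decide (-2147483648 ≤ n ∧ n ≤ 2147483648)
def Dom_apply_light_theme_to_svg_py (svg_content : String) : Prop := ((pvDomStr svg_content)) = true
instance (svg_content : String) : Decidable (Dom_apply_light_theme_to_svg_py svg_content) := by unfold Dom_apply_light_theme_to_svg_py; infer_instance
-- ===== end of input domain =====

-- B replaces A's eight sequential full-string replace passes by one left-to-right
-- table-driven scan emitting replacements as it goes (objective: alternative).


-- ===== PORT A =====
-- A: for each (old_color, new_color) of the dict, two full replace passes (fill, then stroke).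
def apply_light_theme_to_svg_py (svg_content : String) : String :=
  ([("#2D2D2D", "white"), ("rgb(45,45,45)", "white"), ("#FFFFFF", "black"), ("#ffffff", "black")]).foldl
    (fun svg_content oc_nc =>
      let svg_content :=
        PySem.Str.replace svg_content ("fill=\"" ++ oc_nc.1 ++ "\"") ("fill=\"" ++ oc_nc.2 ++ "\"")
      PySem.Str.replace svg_content ("stroke=\"" ++ oc_nc.1 ++ "\"") ("stroke=\"" ++ oc_nc.2 ++ "\""))
    svg_content

-- ===== PORT B =====
-- B: build the (token, replacement) table once, then scan the string once,
-- matching the table at each position (only at 'f'/'s' heads, as in Source B).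
def pvColorMap : List (String × String) :=
  [("#2D2D2D", "white"), ("rgb(45,45,45)", "white"), ("#FFFFFF", "black"), ("#ffffff", "black")]

def pvStrTable : List (String × String) :=
  pvColorMap.foldl (fun tb oc_nc =>
    (["fill", "stroke"]).foldl
      (fun tb attr => tb ++ [(attr ++ "=\"" ++ oc_nc.1 ++ "\"", attr ++ "=\"" ++ oc_nc.2 ++ "\"")]) tb) []

def pvTable : List (List Char × List Char) := pvStrTable.map (fun pr => (pr.1.toList, pr.2.toList))

-- needed by pvScan's termination proof
lemma pvTable_pat_pos : ∀ pr ∈ pvTable, 1 ≤ pr.1.length := by decide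

def pvScan : List Char → List Char
  | [] => []
  | c :: t =>
    if c = 'f' ∨ c = 's' then
      match h : pvTable.find? (fun pr => pr.1.isPrefixOf (c :: t)) with
      | some pr => pr.2 ++ pvScan ((c :: t).drop pr.1.length)
      | none => c :: pvScan t
    else c :: pvScan t
termination_by s => s.length
decreasing_by
  · have hm := List.mem_of_find?_eq_some h
    have hp := pvTable_pat_pos _ hm
    simp only [List.length_drop, List.length_cons]
    omega
  · simp
  · simp

def apply_light_theme_to_svg_py_alt (svg_content : String) : String :=
  String.ofList (pvScan svg_content.toList)

-- ===== PRECONDITION & SPEC =====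
def Spec_apply_light_theme_to_svg_py (svg_content : String) (out : String) : Prop := out = apply_light_theme_to_svg_py_alt svg_content
instance (svg_content : String) (out : String) : Decidable (Spec_apply_light_theme_to_svg_py svg_content out) := by unfold Spec_apply_light_theme_to_svg_py; infer_instance

-- ===== CLAIM (what is proved, stated in full; the proofs are below) =====
def Claim_equal_apply_light_theme_to_svg_py : Prop := ∀ (svg_content : String), Dom_apply_light_theme_to_svg_py svg_content → Spec_apply_light_theme_to_svg_py svg_content (apply_light_theme_to_svg_py svg_content)

-- ===== LEMMAS AND PROOFS =====

def pvStep (acc : List Char) (pr : List Char × List Char) : List Char :=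
  PySem.Chars.replace acc pr.1 pr.2

def pvPats : List (List Char) := pvTable.map Prod.fst
def pvReps : List (List Char) := pvTable.map Prod.snd

lemma fact_pat_ne_nil : ∀ p ∈ pvPats, p ≠ [] := by decide
lemma fact_nodup : pvPats.Nodup := by decide
lemma fact_head : ∀ p ∈ pvPats, p.head? = some 'f' ∨ p.head? = some 's' := by decide
lemma fact_P : ∀ p ∈ pvPats, ∀ q ∈ pvPats,
    (p ≠ q → ¬ p <+: q) ∧
    (∀ d < q.length, 1 ≤ d → ¬ p <+: q.drop d) ∧
    (∀ e < p.length, 1 ≤ e → ¬ p.drop e <+: q) := by decide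
lemma fact_R : ∀ r ∈ pvReps, ∀ q ∈ pvPats,
    (∀ d < r.length, ¬ q <+: r.drop d) ∧
    (∀ d < r.length, ¬ r.drop d <+: q) ∧
    (∀ d < q.length, 1 ≤ d → ¬ r <+: q.drop d) ∧
    (∀ e < q.length, 1 ≤ e → ¬ q.drop e <+: r) := by decide

-- ---- generic lemmas about PySem.Chars.replace ----

lemma go_zero (old new l acc : List Char) :
    PySem.Chars.replace.go old new 0 l acc = acc.reverse ++ l := rfl

lemma go_nil (old new : List Char) (fuel : ℕ) (acc : List Char) :
    PySem.Chars.replace.go old new (fuel + 1) [] acc = acc.reverse := rfl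

lemma go_cons (old new : List Char) (fuel : ℕ) (c : Char) (t acc : List Char) :
    PySem.Chars.replace.go old new (fuel + 1) (c :: t) acc =
      if old.isPrefixOf (c :: t) then
        PySem.Chars.replace.go old new fuel ((c :: t).drop old.length) (new.reverse ++ acc)
      else PySem.Chars.replace.go old new fuel t (c :: acc) := rfl

lemma go_acc (old new : List Char) :
    ∀ fuel (l acc : List Char),
      PySem.Chars.replace.go old new fuel l acc = acc.reverse ++ PySem.Chars.replace.go old new fuel l [] := by
  intro fuel
  induction fuel with
  | zero => intro l acc; simp [go_zero]
  | succ f ih =>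
    intro l acc
    cases l with
    | nil => simp [go_nil]
    | cons c t =>
      rw [go_cons, go_cons]
      split
      · rw [ih _ (new.reverse ++ acc), ih _ (new.reverse ++ [])]
        simp
      · rw [ih _ [c], ih _ (c :: acc)]
        simp

lemma go_fuel (old new : List Char) (hold : old ≠ []) :
    ∀ f₁ f₂ (l : List Char), l.length ≤ f₁ → l.length ≤ f₂ →
      PySem.Chars.replace.go old new f₁ l [] = PySem.Chars.replace.go old new f₂ l [] := by
  intro f₁
  induction f₁ with
  | zero =>
    intro f₂ l h1 _
    have : l = [] := by cases l <;> simp_all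
    subst this
    cases f₂ <;> simp [go_zero, go_nil]
  | succ f ih =>
    intro f₂ l h1 h2
    cases l with
    | nil => cases f₂ <;> simp [go_zero, go_nil]
    | cons c t =>
      have hold1 : 1 ≤ old.length := by cases old <;> simp_all
      cases f₂ with
      | zero => simp at h2
      | succ g =>
        rw [go_cons, go_cons]
        split
        · rw [go_acc _ _ f, go_acc _ _ g]
          congr 1
          apply ih
          · simp only [List.length_drop, List.length_cons] at *; omega
          · simp only [List.length_drop, List.length_cons] at *; omega
        · rw [go_acc _ _ f, go_acc _ _ g]
          congr 1
          apply ih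
          · simp at h1 ⊢; omega
          · simp at h2 ⊢; omega

lemma repl_def (s old new : List Char) (h : old ≠ []) :
    PySem.Chars.replace s old new = PySem.Chars.replace.go old new s.length s [] := by
  simp [PySem.Chars.replace, h]

lemma repl_nil (old new : List Char) (h : old ≠ []) : PySem.Chars.replace [] old new = [] := by
  rw [repl_def _ _ _ h]; rfl

lemma repl_cons_neg (old new : List Char) (c : Char) (t : List Char) (h : old ≠ [])
    (hnp : ¬ old <+: (c :: t)) :
    PySem.Chars.replace (c :: t) old new = c :: PySem.Chars.replace t old new := by
  rw [repl_def _ _ _ h, repl_def _ _ _ h]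
  have hb : old.isPrefixOf (c :: t) = false := by
    rw [← Bool.not_eq_true, List.isPrefixOf_iff_prefix]; exact hnp
  rw [List.length_cons, go_cons, hb]
  simp only [Bool.false_eq_true, if_false]
  rw [go_acc]
  simp

lemma repl_match (old new u : List Char) (h : old ≠ []) :
    PySem.Chars.replace (old ++ u) old new = new ++ PySem.Chars.replace u old new := by
  cases old with
  | nil => exact absurd rfl h
  | cons o os =>
    rw [repl_def _ _ _ h, repl_def _ _ _ h]
    have hlen : ((o :: os) ++ u).length = (os.length + u.length) + 1 := by simp only [List.length_append, List.length_cons]; omega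
    rw [hlen]
    have hcons : (o :: os) ++ u = o :: (os ++ u) := by simp
    rw [hcons, go_cons]
    have hpre : (o :: os).isPrefixOf (o :: (os ++ u)) = true := by
      rw [List.isPrefixOf_iff_prefix, ← hcons]; exact List.prefix_append _ _
    rw [hpre]
    simp only [if_true]
    have hdrop : (o :: (os ++ u)).drop (o :: os).length = u := by
      rw [← hcons]; exact List.drop_left
    rw [hdrop, go_acc]
    simp only [List.append_nil, List.reverse_reverse]
    congr 1
    exact go_fuel _ _ h _ _ _ (by omega) (by omega)

lemma repl_append (old new : List Char) (h : old ≠ []) :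
    ∀ (x w : List Char), (∀ m < x.length, ¬ old <+: (x ++ w).drop m) →
      PySem.Chars.replace (x ++ w) old new = x ++ PySem.Chars.replace w old new := by
  intro x
  induction x with
  | nil => intro w _; simp
  | cons c x' ih =>
    intro w hm
    have h0 : ¬ old <+: (c :: (x' ++ w)) := by
      have := hm 0 (by simp)
      simpa using this
    rw [List.cons_append, repl_cons_neg _ _ _ _ h h0, ih w ?_]
    · simp
    · intro m hmlt
      have := hm (m + 1) (by simp; omega)
      simpa using this

lemma repl_id (s old new : List Char) (h : old ≠ [])
    (hm : ∀ m < s.length, ¬ old <+: s.drop m) : PySem.Chars.replace s old new = s := by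
  have := repl_append old new h s [] (by simpa using hm)
  simpa [repl_nil _ _ h] using this

-- ---- no-match propagation lemmas ----

lemma pfx_split {p y w : List Char} {m : ℕ} (hm : m < y.length)
    (hp : p <+: (y ++ w).drop m) : p <+: y.drop m ∨ y.drop m <+: p := by
  rw [List.drop_append_of_le_length hm.le] at hp
  exact List.prefix_or_prefix_of_prefix hp (List.prefix_append _ _)

lemma nm_cross {x mid w q : List Char}
    (hx : ∀ m < x.length, ¬ q <+: x.drop m)
    (hC1 : ∀ e < q.length, 1 ≤ e → ¬ q.drop e <+: mid)
    (hC2 : ∀ e < q.length, 1 ≤ e → ¬ mid <+: q.drop e) :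
    ∀ m < x.length, ¬ q <+: (x ++ (mid ++ w)).drop m := by
  intro m hm hq
  by_cases hqx : q <+: x.drop m
  · exact hx m hm hqx
  rcases pfx_split hm hq with h | h
  · exact hqx h
  · have hne : x.drop m ≠ q := fun hEq => hqx (hEq ▸ List.prefix_refl _)
    have ha : (x.drop m).length = x.length - m := List.length_drop ..
    have he1 : 1 ≤ (x.drop m).length := by omega
    have helt : (x.drop m).length < q.length := by
      rcases lt_or_eq_of_le h.length_le with h' | h'
      · exact h'
      · exact absurd (List.IsPrefix.eq_of_length h h') hne
    obtain ⟨a', haq⟩ := h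
    have hq' : x.drop m ++ a' <+: x.drop m ++ (mid ++ w) := by
      rw [List.drop_append_of_le_length hm.le] at hq
      rw [haq]; exact hq
    have ha' : a' <+: mid ++ w := (List.prefix_append_right_inj _).mp hq'
    have hdrop : q.drop (x.drop m).length = a' := by
      rw [← haq]; exact List.drop_left
    rcases List.prefix_or_prefix_of_prefix ha' (List.prefix_append mid w) with h1 | h1
    · exact hC1 _ helt he1 (hdrop ▸ h1)
    · exact hC2 _ helt he1 (hdrop ▸ h1)

lemma nm_inner {mid w q : List Char}
    (hA : ∀ d < mid.length, ¬ q <+: mid.drop d)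
    (hB : ∀ d < mid.length, ¬ mid.drop d <+: q) :
    ∀ d < mid.length, ¬ q <+: (mid ++ w).drop d := by
  intro d hd hq
  rcases pfx_split hd hq with h | h
  · exact hA d hd h
  · exact hB d hd h

lemma nm_both {x mid w q : List Char}
    (hx : ∀ m < x.length, ¬ q <+: x.drop m)
    (hC1 : ∀ e < q.length, 1 ≤ e → ¬ q.drop e <+: mid)
    (hC2 : ∀ e < q.length, 1 ≤ e → ¬ mid <+: q.drop e)
    (hA : ∀ d < mid.length, ¬ q <+: mid.drop d)
    (hB : ∀ d < mid.length, ¬ mid.drop d <+: q) :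
    ∀ m < (x ++ mid).length, ¬ q <+: ((x ++ mid) ++ w).drop m := by
  intro m hm hq
  rw [List.append_assoc] at hq
  by_cases h : m < x.length
  · exact nm_cross hx hC1 hC2 m h hq
  · push_neg at h
    have hrw : (x ++ (mid ++ w)).drop m = (mid ++ w).drop (m - x.length) := by
      rw [List.drop_append, List.drop_eq_nil_of_le h, List.nil_append]
    rw [hrw] at hq
    have hd : m - x.length < mid.length := by
      simp only [List.length_append] at hm; omega
    exact nm_inner hA hB _ hd hq

-- ---- fold lemmas ----

lemma foldl_nil_all (L : List (List Char × List Char)) (h : ∀ pr ∈ L, pr.1 ≠ []) :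
    L.foldl pvStep [] = [] := by
  induction L with
  | nil => rfl
  | cons hd tl ih =>
    rw [List.foldl_cons]
    have : pvStep [] hd = [] := repl_nil _ _ (h hd (by simp))
    rw [this]
    exact ih (fun pr hpr => h pr (by simp [hpr]))

lemma foldl_skip (L : List (List Char × List Char)) (y : List Char)
    (hL : ∀ pr ∈ L, pr.1 ≠ [] ∧ ∀ (w : List Char), ∀ m < y.length, ¬ pr.1 <+: (y ++ w).drop m) :
    ∀ v, L.foldl pvStep (y ++ v) = y ++ L.foldl pvStep v := by
  induction L with
  | nil => intro v; rfl
  | cons hd tl ih =>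
    intro v
    rw [List.foldl_cons, List.foldl_cons]
    have hstep : pvStep (y ++ v) hd = y ++ pvStep v hd :=
      repl_append _ _ (hL hd (by simp)).1 y v ((hL hd (by simp)).2 v)
    rw [hstep]
    exact ih (fun pr hpr => hL pr (by simp [hpr])) (pvStep v hd)

lemma foldl_id (L : List (List Char × List Char)) (s : List Char)
    (h : ∀ pr ∈ L, pr.1 ≠ [] ∧ ∀ m < s.length, ¬ pr.1 <+: s.drop m) :
    L.foldl pvStep s = s := by
  induction L with
  | nil => rfl
  | cons hd tl ih =>
    rw [List.foldl_cons]
    have : pvStep s hd = s := repl_id _ _ _ (h hd (by simp)).1 (h hd (by simp)).2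
    rw [this]
    exact ih (fun pr hpr => h pr (by simp [hpr]))

-- ---- pvScan unfolding and lemmas ----

lemma pvScan_nil : pvScan [] = [] := by rw [pvScan]

lemma pvScan_cons_none (c : Char) (t : List Char)
    (h : pvTable.find? (fun pr => pr.1.isPrefixOf (c :: t)) = none) :
    pvScan (c :: t) = c :: pvScan t := by
  rw [pvScan]
  split
  · rw [h]
  · rfl

lemma pvScan_cons_some (c : Char) (t : List Char) (pr : List Char × List Char)
    (hfs : c = 'f' ∨ c = 's')
    (h : pvTable.find? (fun pr => pr.1.isPrefixOf (c :: t)) = some pr) :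
    pvScan (c :: t) = pr.2 ++ pvScan ((c :: t).drop pr.1.length) := by
  rw [pvScan]
  rw [if_pos hfs]
  split
  next pr' h' =>
    rw [h] at h'
    cases h'
    rfl
  next h' => rw [h'] at h; cases h

lemma find?_mid {α : Type} (pred : α → Bool) (L₁ : List α) (b : α) (L₂ : List α)
    (h1 : ∀ a ∈ L₁, pred a = false) (hb : pred b = true) :
    (L₁ ++ b :: L₂).find? pred = some b := by
  induction L₁ with
  | nil => simpa using List.find?_cons_of_pos hb
  | cons hd tl ih =>
    rw [List.cons_append, List.find?_cons_of_neg (by simp [h1 hd (by simp)])]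
    exact ih (fun a ha => h1 a (by simp [ha]))

lemma scan_append : ∀ (x w : List Char),
    (∀ m < x.length, ∀ pr ∈ pvTable, ¬ pr.1 <+: (x ++ w).drop m) →
    pvScan (x ++ w) = x ++ pvScan w := by
  intro x
  induction x with
  | nil => intro w _; simp
  | cons c x' ih =>
    intro w hm
    have hnone : pvTable.find? (fun pr => pr.1.isPrefixOf (c :: (x' ++ w))) = none := by
      rw [List.find?_eq_none]
      intro pr hpr
      simp only [Bool.not_eq_true, ← Bool.not_eq_true, List.isPrefixOf_iff_prefix]
      have := hm 0 (by simp) pr hpr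
      simpa using this
    rw [List.cons_append, pvScan_cons_none _ _ hnone, ih w ?_]
    · simp
    · intro m hmlt pr hpr
      have := hm (m + 1) (by simp; omega) pr hpr
      simpa using this

lemma scan_id (s : List Char) (h : ∀ m < s.length, ∀ pr ∈ pvTable, ¬ pr.1 <+: s.drop m) :
    pvScan s = s := by
  have := scan_append s [] (by simpa using h)
  simpa [pvScan_nil] using this

-- patterns are pairwise non-prefix, so at most one matches a given list
lemma pat_unique {p q z : List Char} (hp : p ∈ pvPats) (hq : q ∈ pvPats)
    (h1 : p <+: z) (h2 : q <+: z) : p = q := by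
  by_contra hne
  rcases List.prefix_or_prefix_of_prefix h1 h2 with h | h
  · exact (fact_P p hp q hq).1 hne h
  · exact (fact_P q hq p hp).1 (Ne.symm hne) h

-- ---- the core equivalence ----

lemma core : ∀ (n : ℕ) (s : List Char), s.length ≤ n →
    pvTable.foldl pvStep s = pvScan s := by
  intro n
  induction n with
  | zero =>
    intro s hs
    have : s = [] := by cases s <;> simp_all
    subst this
    rw [pvScan_nil]
    exact foldl_nil_all _ (fun pr hpr => fact_pat_ne_nil pr.1 (List.mem_map_of_mem hpr))
  | succ n ih =>
    intro s hs
    classical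
    by_cases hM : ∃ m, ∃ pr ∈ pvTable, pr.1 <+: s.drop m
    · set k := Nat.find hM with hkdef
      obtain ⟨pr, hpr, hpfx⟩ := Nat.find_spec hM
      have H1 : ∀ m < k, ∀ pr' ∈ pvTable, ¬ pr'.1 <+: s.drop m :=
        fun m hm pr' h' hp => Nat.find_min hM hm ⟨pr', h', hp⟩
      have hpmem : pr.1 ∈ pvPats := List.mem_map_of_mem hpr
      have hpne : pr.1 ≠ [] := fact_pat_ne_nil _ hpmem
      have hkin : k < s.length := by
        by_contra hc
        push_neg at hc
        rw [List.drop_eq_nil_of_le hc] at hpfx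
        exact hpne (List.prefix_nil.mp hpfx)
      obtain ⟨u, hu⟩ := hpfx
      set x := s.take k with hxdef
      have hxlen : x.length = k := by rw [hxdef, List.length_take]; omega
      have hs' : s = x ++ (pr.1 ++ u) := by
        conv_lhs => rw [← List.take_append_drop k s]
        rw [hu]
      -- no pattern occurs (as a full occurrence) starting inside x
      have hx : ∀ q ∈ pvPats, ∀ m < x.length, ¬ q <+: x.drop m := by
        intro q hq m hm hqx
        obtain ⟨pr'', hpr'', hfst⟩ := List.mem_map.mp hq
        refine H1 m (by omega) pr'' hpr'' ?_
        rw [hfst]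
        have hsm : s.drop m = x.drop m ++ (pr.1 ++ u) := by
          conv_lhs => rw [hs']
          rw [List.drop_append_of_le_length (by omega)]
        rw [hsm]
        exact hqx.trans (List.prefix_append _ _)
      -- no pattern can match anywhere in x when the tail starts with pr.1
      have hcrossP : ∀ q ∈ pvPats, ∀ (w : List Char), ∀ m < x.length,
          ¬ q <+: (x ++ (pr.1 ++ w)).drop m := by
        intro q hq w
        exact nm_cross (hx q hq)
          (fun e he h1 => (fact_P q hq pr.1 hpmem).2.2 e he h1)
          (fun e he h1 => (fact_P pr.1 hpmem q hq).2.1 e he h1)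
      have hinnerP : ∀ q ∈ pvPats, q ≠ pr.1 →
          (∀ d < pr.1.length, ¬ q <+: pr.1.drop d) ∧
          (∀ d < pr.1.length, ¬ pr.1.drop d <+: q) := by
        intro q hq hne
        constructor
        · intro d hd hqp
          rcases Nat.eq_zero_or_pos d with h0 | h1
          · subst h0; simp only [List.drop_zero] at hqp
            exact (fact_P q hq pr.1 hpmem).1 hne hqp
          · exact (fact_P q hq pr.1 hpmem).2.1 d hd h1 hqp
        · intro d hd hqp
          rcases Nat.eq_zero_or_pos d with h0 | h1
          · subst h0; simp only [List.drop_zero] at hqp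
            exact (fact_P pr.1 hpmem q hq).1 (Ne.symm hne) hqp
          · exact (fact_P pr.1 hpmem q hq).2.2 d hd h1 hqp
      -- split the table at the matching entry
      obtain ⟨T₁, T₂, hT⟩ := List.append_of_mem hpr
      have hsubT1 : ∀ pr' ∈ T₁, pr' ∈ pvTable := by
        intro pr' h'; rw [hT]; exact List.mem_append_left _ h'
      have hsubT2 : ∀ pr' ∈ T₂, pr' ∈ pvTable := by
        intro pr' h'; rw [hT]; exact List.mem_append_right _ (List.mem_cons_of_mem _ h')
      have hnodup := fact_nodup
      rw [show pvPats = pvTable.map Prod.fst from rfl, hT] at hnodup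
      simp only [List.map_append, List.map_cons] at hnodup
      rw [List.nodup_append] at hnodup
      have hT1ne : ∀ pr' ∈ T₁, pr'.1 ≠ pr.1 := by
        intro pr' h'
        exact hnodup.2.2 pr'.1 (List.mem_map_of_mem h') pr.1 (by simp)
      have hT2ne : ∀ pr' ∈ T₂, pr'.1 ≠ pr.1 := by
        intro pr' h' hEq
        have hn := hnodup.2.1
        rw [List.nodup_cons] at hn
        exact hn.1 (hEq ▸ List.mem_map_of_mem h')
      -- FOLD side
      have hside : pvTable.foldl pvStep s = x ++ (pr.2 ++ pvTable.foldl pvStep u) := by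
        rw [hT, List.foldl_append, List.foldl_cons]
        have hst1 : T₁.foldl pvStep s = (x ++ pr.1) ++ T₁.foldl pvStep u := by
          conv_lhs => rw [hs', ← List.append_assoc]
          refine foldl_skip T₁ (x ++ pr.1) ?_ u
          intro pr' h'
          have hq : pr'.1 ∈ pvPats := List.mem_map_of_mem (hsubT1 pr' h')
          have hne : pr'.1 ≠ pr.1 := hT1ne pr' h'
          refine ⟨fact_pat_ne_nil _ hq, fun w => ?_⟩
          exact nm_both (hx _ hq)
            (fun e he h1 => (fact_P _ hq _ hpmem).2.2 e he h1)
            (fun e he h1 => (fact_P _ hpmem _ hq).2.1 e he h1)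
            (hinnerP _ hq hne).1 (hinnerP _ hq hne).2
        rw [hst1]
        have hst2 : pvStep ((x ++ pr.1) ++ T₁.foldl pvStep u) pr
            = (x ++ pr.2) ++ pvStep (T₁.foldl pvStep u) pr := by
          show PySem.Chars.replace ((x ++ pr.1) ++ T₁.foldl pvStep u) pr.1 pr.2 = _
          rw [List.append_assoc,
              repl_append pr.1 pr.2 hpne x _ (hcrossP pr.1 hpmem (T₁.foldl pvStep u)),
              repl_match pr.1 pr.2 _ hpne, ← List.append_assoc]
          rfl
        rw [hst2]
        have hst3 : T₂.foldl pvStep ((x ++ pr.2) ++ pvStep (T₁.foldl pvStep u) pr)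
            = (x ++ pr.2) ++ T₂.foldl pvStep (pvStep (T₁.foldl pvStep u) pr) := by
          refine foldl_skip T₂ (x ++ pr.2) ?_ _
          intro pr' h'
          have hq : pr'.1 ∈ pvPats := List.mem_map_of_mem (hsubT2 pr' h')
          have hrmem : pr.2 ∈ pvReps := List.mem_map_of_mem hpr
          refine ⟨fact_pat_ne_nil _ hq, fun w => ?_⟩
          exact nm_both (hx _ hq)
            (fun e he h1 => (fact_R _ hrmem _ hq).2.2.2 e he h1)
            (fun e he h1 => (fact_R _ hrmem _ hq).2.2.1 e he h1)
            (fun d hd => (fact_R _ hrmem _ hq).1 d hd)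
            (fun d hd => (fact_R _ hrmem _ hq).2.1 d hd)
        rw [hst3, List.foldl_append, List.foldl_cons]
        simp [List.append_assoc]
      -- SCAN side
      have hscan : pvScan s = x ++ (pr.2 ++ pvScan u) := by
        have hpre : ∀ m < x.length, ∀ pr' ∈ pvTable, ¬ pr'.1 <+: (x ++ (pr.1 ++ u)).drop m := by
          intro m hm pr' h'
          rw [← hs']
          exact H1 m (by omega) pr' h'
        have hfind : pvTable.find? (fun pr' => pr'.1.isPrefixOf (pr.1 ++ u)) = some pr := by
          rw [hT]
          refine find?_mid _ _ _ _ ?_ ?_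
          · intro a ha
            have hnp : ¬ a.1 <+: pr.1 ++ u := by
              intro hcontra
              exact hT1ne a ha
                (pat_unique (List.mem_map_of_mem (hsubT1 a ha)) hpmem hcontra
                  (List.prefix_append _ _))
            simp only [Bool.eq_false_iff, ne_eq, List.isPrefixOf_iff_prefix]
            exact hnp
          · simp only [List.isPrefixOf_iff_prefix]
            exact List.prefix_append _ _
        obtain ⟨c, p', hcp⟩ : ∃ c p', pr.1 = c :: p' := by
          cases hpp : pr.1 with
          | nil => exact absurd hpp hpne
          | cons a b => exact ⟨a, b, rfl⟩
        have hfs : c = 'f' ∨ c = 's' := by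
          have hh := fact_head pr.1 hpmem
          rw [hcp] at hh
          simpa using hh
        rw [hcp, List.cons_append] at hfind
        have hdrop : (c :: (p' ++ u)).drop pr.1.length = u := by
          rw [hcp, ← List.cons_append]
          exact List.drop_left
        conv_lhs => rw [hs']
        rw [scan_append x (pr.1 ++ u) hpre, hcp, List.cons_append,
            pvScan_cons_some c (p' ++ u) pr hfs hfind, hdrop]
      -- combine with the induction hypothesis
      have hulen : u.length ≤ n := by
        have hlen : s.length = x.length + (pr.1.length + u.length) := by
          rw [hs']; simp
        have h1 : 1 ≤ pr.1.length := by
          cases hpp : pr.1 with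
          | nil => exact absurd hpp hpne
          | cons a b => simp
        omega
      rw [hside, hscan, ih u hulen]
    · push_neg at hM
      have h' : ∀ m < s.length, ∀ pr ∈ pvTable, ¬ pr.1 <+: s.drop m :=
        fun m _ pr hpr => hM m pr hpr
      rw [scan_id s h']
      exact foldl_id _ _ (fun pr hpr =>
        ⟨fact_pat_ne_nil pr.1 (List.mem_map_of_mem hpr), fun m hm => h' m hm pr hpr⟩)

-- ---- bridging the String-level ports to the List-level computation ----

lemma pvTable_eval : pvTable =
    [(("fill=\"" ++ "#2D2D2D" ++ "\"").toList, ("fill=\"" ++ "white" ++ "\"").toList),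
     (("stroke=\"" ++ "#2D2D2D" ++ "\"").toList, ("stroke=\"" ++ "white" ++ "\"").toList),
     (("fill=\"" ++ "rgb(45,45,45)" ++ "\"").toList, ("fill=\"" ++ "white" ++ "\"").toList),
     (("stroke=\"" ++ "rgb(45,45,45)" ++ "\"").toList, ("stroke=\"" ++ "white" ++ "\"").toList),
     (("fill=\"" ++ "#FFFFFF" ++ "\"").toList, ("fill=\"" ++ "black" ++ "\"").toList),
     (("stroke=\"" ++ "#FFFFFF" ++ "\"").toList, ("stroke=\"" ++ "black" ++ "\"").toList),
     (("fill=\"" ++ "#ffffff" ++ "\"").toList, ("fill=\"" ++ "black" ++ "\"").toList),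
     (("stroke=\"" ++ "#ffffff" ++ "\"").toList, ("stroke=\"" ++ "black" ++ "\"").toList)] := by
  decide

lemma portA_toList (s : String) :
    (apply_light_theme_to_svg_py s).toList = pvTable.foldl pvStep s.toList := by
  rw [pvTable_eval]
  simp only [apply_light_theme_to_svg_py, List.foldl_cons, List.foldl_nil, pvStep,
    PySem.Str.toList_replace]

lemma portB_toList (s : String) :
    (apply_light_theme_to_svg_py_alt s).toList = pvScan s.toList := by
  simp only [apply_light_theme_to_svg_py_alt, String.toList_ofList]

-- ===== VERDICT (by name: the statement is the Claim_ definition above) =====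
theorem apply_light_theme_to_svg_py_spec : Claim_equal_apply_light_theme_to_svg_py := by
  intro s _
  unfold Spec_apply_light_theme_to_svg_py
  have h : (apply_light_theme_to_svg_py s).toList = (apply_light_theme_to_svg_py_alt s).toList := by
    rw [portA_toList, portB_toList]
    exact core s.toList.length s.toList le_rfl
  calc apply_light_theme_to_svg_py s
      = String.ofList (apply_light_theme_to_svg_py s).toList := by rw [String.ofList_toList]
    _ = String.ofList (apply_light_theme_to_svg_py_alt s).toList := by rw [h]
    _ = apply_light_theme_to_svg_py_alt s := by rw [String.ofList_toList]
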